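-- pv_equiv track=rewrite | github.com/sergeroshe/Stepik_course | Work_files/2_num_guessing_game_copy.py | min_guaranteed_guess_count
-- ===== SOURCE A (Python) =====
-- def min_guaranteed_guess_count(left_border, right_border):
--     middle = (left_border + right_border) // 2 + 1
--     division_count = 0
--
--     while middle != left_border:
--         middle = (left_border + right_border) // 2
--         division_count += 1
--         right_border = middle
--
--     return division_count
-- ===== SOURCE B (Python) =====
-- def min_guaranteed_guess_count(left_border, right_border):
--     gap = right_border - left_border
--     if gap < 0:
--         return 0
--     return max(gap.bit_length(), 1)
-- ===== Notes on version B (the rewrite author's own statement) =====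
-- stated objective: simpler
-- what changed: Replaces the halving while-loop with a closed form: the answer is bit_length(right-left) (at least 1), and 0 for a negative gap; no loop at all.
import Mathlib
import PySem

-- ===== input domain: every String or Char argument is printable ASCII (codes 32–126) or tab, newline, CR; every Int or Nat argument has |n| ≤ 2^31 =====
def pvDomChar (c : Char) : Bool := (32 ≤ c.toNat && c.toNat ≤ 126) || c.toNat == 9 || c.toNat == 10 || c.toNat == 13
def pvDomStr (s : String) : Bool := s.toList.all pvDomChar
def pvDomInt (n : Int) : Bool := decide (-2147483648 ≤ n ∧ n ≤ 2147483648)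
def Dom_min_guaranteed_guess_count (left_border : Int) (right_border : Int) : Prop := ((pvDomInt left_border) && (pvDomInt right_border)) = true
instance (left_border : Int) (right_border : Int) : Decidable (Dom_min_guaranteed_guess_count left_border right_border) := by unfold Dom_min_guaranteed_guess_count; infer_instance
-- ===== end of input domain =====

-- B replaces A's halving while-loop by a closed form (bit length of the gap); equivalence is
-- proved on Pre_, the inputs where A's loop terminates.

-- ===== PORT A =====
-- A's while-loop, fuel-bounded only to make it total in Lean (under Pre_ the fuel is ample;
-- outside Pre_ the Python loop never terminates).
def pvALoop : Nat → Int → Int → Int → Int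
  | 0, _, _, cnt => cnt
  | fuel + 1, l, r, cnt =>
      let middle := PySem.Int.floordiv (l + r) 2
      let cnt := cnt + 1
      if middle = l then cnt else pvALoop fuel l middle cnt

def min_guaranteed_guess_count (left_border : Int) (right_border : Int) : Int :=
  let middle := PySem.Int.floordiv (left_border + right_border) 2 + 1
  if middle = left_border then 0
  else pvALoop ((right_border - left_border).toNat + 1) left_border right_border 0

-- ===== PORT B =====
def min_guaranteed_guess_count_alt (left_border : Int) (right_border : Int) : Int :=
  let gap := right_border - left_border
  if gap < 0 then 0
  else max ((PySem.Int.bitLength gap : Nat) : Int) 1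

-- ===== PRECONDITION & SPEC =====
-- Pre_ excludes exactly the inputs with right_border - left_border ≤ -3, on which A's while-loop
-- never terminates (the midpoint gets stuck strictly below left_border); A returns on all other inputs.
def Pre_min_guaranteed_guess_count (left_border : Int) (right_border : Int) : Prop :=
  left_border - right_border ≤ 2
instance (left_border : Int) (right_border : Int) : Decidable (Pre_min_guaranteed_guess_count left_border right_border) := by unfold Pre_min_guaranteed_guess_count; infer_instance

def pvWitness_min_guaranteed_guess_count : Int × Int := (3, 10)

def Spec_min_guaranteed_guess_count (left_border : Int) (right_border : Int) (out : Int) : Prop := out = min_guaranteed_guess_count_alt left_border right_border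
instance (left_border : Int) (right_border : Int) (out : Int) : Decidable (Spec_min_guaranteed_guess_count left_border right_border out) := by unfold Spec_min_guaranteed_guess_count; infer_instance

-- ===== CLAIM (what is proved, stated in full; the proofs are below) =====
def Claim_equal_min_guaranteed_guess_count : Prop := ∀ (left_border : Int) (right_border : Int), Dom_min_guaranteed_guess_count left_border right_border → Pre_min_guaranteed_guess_count left_border right_border → Spec_min_guaranteed_guess_count left_border right_border (min_guaranteed_guess_count left_border right_border)

-- ===== LEMMAS AND PROOFS =====

-- Each loop body sets right := l + g/2, so the loop on gap g returns cnt + max (bitLength g) 1.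
theorem pvALoop_eq (fuel : Nat) : ∀ (g : Nat) (l cnt : Int), g + 1 ≤ fuel →
    pvALoop fuel l (l + (g : Int)) cnt = cnt + ((max (PySem.Int.bitLength (g : Int)) 1 : Nat) : Int) := by
  induction fuel with
  | zero => intro g l cnt h; omega
  | succ n ih =>
    intro g l cnt h
    have hm : PySem.Int.floordiv (l + (l + (g : Int))) 2 = l + ((g / 2 : Nat) : Int) := by
      rw [PySem.Int.floordiv_eq_ediv_of_pos (by omega)]; omega
    simp only [pvALoop, hm]
    by_cases h2 : g / 2 = 0
    · -- g = 0 or 1: midpoint equals left_border, loop exits with cnt + 1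
      have hlt : g < 2 := by omega
      interval_cases g <;> simp <;> decide
    · have hge : 2 ≤ g := by omega
      have hne : ¬ (l + ((g / 2 : Nat) : Int) = l) := by
        intro hc; omega
      rw [if_neg hne, ih (g / 2) l (cnt + 1) (by omega)]
      have hbl : PySem.Int.bitLength (g : Int) = PySem.Int.bitLength ((g / 2 : Nat) : Int) + 1 :=
        PySem.Int.bitLength_natCast (by omega)
      have hbl2 : 1 ≤ PySem.Int.bitLength ((g / 2 : Nat) : Int) := by
        by_contra hlt
        have h0 : PySem.Int.bitLength ((g / 2 : Nat) : Int) = 0 := by omega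
        have := PySem.Int.lt_two_pow_bitLength ((g / 2 : Nat) : Int)
        rw [h0] at this
        simp at this
        omega
      rw [hbl]
      omega

-- ===== VERDICT (by name: the statement is the Claim_ definition above) =====
theorem min_guaranteed_guess_count_spec : Claim_equal_min_guaranteed_guess_count := by
  intro l r _ hpre
  unfold Spec_min_guaranteed_guess_count min_guaranteed_guess_count min_guaranteed_guess_count_alt
  unfold Pre_min_guaranteed_guess_count at hpre
  by_cases hneg : r - l < 0
  · -- gap is -1 or -2: initial midpoint + 1 equals left_border, A returns 0 immediately
    have hm0 : PySem.Int.floordiv (l + r) 2 + 1 = l := by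
      rw [PySem.Int.floordiv_eq_ediv_of_pos (by omega)]; omega
    rw [if_pos hm0, if_pos hneg]
  · have hg : r = l + ((r - l).toNat : Int) := by omega
    have hm0 : ¬ (PySem.Int.floordiv (l + r) 2 + 1 = l) := by
      rw [PySem.Int.floordiv_eq_ediv_of_pos (by omega)]; omega
    rw [if_neg hm0, if_neg hneg]
    rw [hg] at hm0 ⊢
    rw [show l + ((r - l).toNat : Int) - l = ((r - l).toNat : Int) by omega]
    rw [Int.toNat_natCast, pvALoop_eq ((r - l).toNat + 1) ((r - l).toNat) l 0 (by omega)]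
    simp
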